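-- pv_equiv track=rewrite | github.com/kimhuni/RefMe-VLA | evaluate/eval_helm_v2/helm_dataset.py | _find_subsequence
-- ===== SOURCE A (Python) =====
-- from typing import Any, Dict, List, Optional, Tuple, Union
--
-- def _find_subsequence(haystack: List[int], needle: List[int]) -> int:
--     """Return start index of needle in haystack, or -1 if not found."""
--     if not needle or len(needle) > len(haystack):
--         return -1
--     L = len(needle)
--     for i in range(len(haystack) - L, -1, -1):
--         if haystack[i : i + L] == needle:
--             return i
--     return -1
-- ===== SOURCE B (Python) =====
-- def _find_subsequence(haystack, needle):
--     """Return start index of needle in haystack, or -1 if not found."""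
--     L = len(needle)
--     if L == 0 or L > len(haystack):
--         return -1
--     return max((i for i in range(len(haystack) - L + 1)
--                 if haystack[i:i + L] == needle), default=-1)
-- ===== Notes on version B (the rewrite author's own statement) =====
-- stated objective: simpler
-- what changed: Replaces A's backward loop with early return by a forward comprehension of all match positions reduced with max(default=-1); a proof that the last forward match equals the first backward match links them.
import Mathlib
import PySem

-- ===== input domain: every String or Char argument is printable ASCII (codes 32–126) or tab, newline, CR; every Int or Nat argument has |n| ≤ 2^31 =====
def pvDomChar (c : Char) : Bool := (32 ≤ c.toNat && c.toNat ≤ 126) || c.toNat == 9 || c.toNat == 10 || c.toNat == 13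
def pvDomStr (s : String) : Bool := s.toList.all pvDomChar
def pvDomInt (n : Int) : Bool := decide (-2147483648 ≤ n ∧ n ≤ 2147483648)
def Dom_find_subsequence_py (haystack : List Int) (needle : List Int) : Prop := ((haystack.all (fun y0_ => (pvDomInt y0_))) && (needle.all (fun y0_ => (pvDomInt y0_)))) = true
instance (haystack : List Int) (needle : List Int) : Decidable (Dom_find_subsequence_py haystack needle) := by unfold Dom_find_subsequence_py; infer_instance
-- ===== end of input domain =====

-- B replaces A's backward early-return scan by a forward comprehension of all match
-- positions reduced with max(default=-1): simpler, same cost.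

-- ===== PORT A =====
-- the backward 'for i in range(len(haystack)-L, -1, -1): if … return i' loop
def findLoopA (haystack needle : List Int) (L : Int) : List Int → Int
  | [] => -1
  | i :: rest =>
      if (PySem.List.slice haystack (some i) (some (i + L))) == needle then i
      else findLoopA haystack needle L rest

def find_subsequence_py (haystack : List Int) (needle : List Int) : Int :=
  if needle = [] ∨ (needle.length : Int) > (haystack.length : Int) then -1
  else
    let L : Int := needle.length
    findLoopA haystack needle L (PySem.List.pyRange ((haystack.length : Int) - L) (-1) (-1))

-- ===== PORT B =====
def find_subsequence_py_alt (haystack : List Int) (needle : List Int) : Int :=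
  let L : Int := needle.length
  if L = 0 ∨ L > (haystack.length : Int) then -1
  else
    PySem.List.maxD
      ((PySem.List.pyRange 0 ((haystack.length : Int) - L + 1) 1).filter
        (fun i => (PySem.List.slice haystack (some i) (some (i + L))) == needle))
      id (-1)

-- ===== PRECONDITION & SPEC =====
def Spec_find_subsequence_py (haystack : List Int) (needle : List Int) (out : Int) : Prop := out = find_subsequence_py_alt haystack needle
instance (haystack : List Int) (needle : List Int) (out : Int) : Decidable (Spec_find_subsequence_py haystack needle out) := by unfold Spec_find_subsequence_py; infer_instance

-- ===== CLAIM (what is proved, stated in full; the proofs are below) =====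
def Claim_equal_find_subsequence_py : Prop := ∀ (haystack : List Int) (needle : List Int), Dom_find_subsequence_py haystack needle → Spec_find_subsequence_py haystack needle (find_subsequence_py haystack needle)

-- ===== LEMMAS AND PROOFS =====

-- A's loop returns the first match of the traversed index list (default -1)
theorem findLoopA_eq (h nd : List Int) (L : Int) (l : List Int) :
    findLoopA h nd L l =
      ((l.filter (fun i => (PySem.List.slice h (some i) (some (i + L))) == nd)).head?).getD (-1) := by
  induction l with
  | nil => rfl
  | cons x rest ih =>
    simp only [findLoopA, List.filter_cons]
    by_cases hx : ((PySem.List.slice h (some x) (some (x + L))) == nd) = true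
    · simp [hx]
    · simp only [hx, Bool.false_eq_true, if_false, ih]

-- on a strictly increasing tail, Python's max keeps replacing the accumulator
theorem max?_cons_chain : ∀ (t : List Int), ∀ m : Int, (∀ y ∈ t, m < y) →
    List.Pairwise (· < ·) t → PySem.List.max? (m :: t) id = some (t.getLastD m) := by
  intro t
  induction t with
  | nil => intro m _ _; rfl
  | cons y ys ih =>
    intro m hm hp
    have hmy : m < y := hm y List.mem_cons_self
    have h2 := ih y (List.pairwise_cons.mp hp).1 (List.pairwise_cons.mp hp).2
    have hstep : PySem.List.max? (m :: y :: ys) id = PySem.List.max? (y :: ys) id := by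
      simp only [PySem.List.max?, List.foldl_cons, id_eq, hmy, if_pos]
    rw [hstep, h2, List.getLastD_cons]

theorem getLast?_cons_eq (x : Int) (t : List Int) : (x :: t).getLast? = some (t.getLastD x) := by
  induction t generalizing x with
  | nil => rfl
  | cons z zs ih => simp only [List.getLastD_cons]; rw [← ih z]; rfl

-- on a strictly increasing list, Python's max is the last element
theorem max?_chain (xs : List Int) (hp : xs.Pairwise (· < ·)) :
    PySem.List.max? xs id = xs.getLast? := by
  cases xs with
  | nil => rfl
  | cons m t =>
    rw [getLast?_cons_eq]
    exact max?_cons_chain t m (List.pairwise_cons.mp hp).1 (List.pairwise_cons.mp hp).2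

theorem guard_iff (haystack needle : List Int) :
    (needle = [] ∨ (needle.length : Int) > (haystack.length : Int)) ↔
    ((needle.length : Int) = 0 ∨ (needle.length : Int) > (haystack.length : Int)) := by
  constructor
  · rintro (h | h)
    · left; simp [h]
    · right; exact h
  · rintro (h | h)
    · left; exact List.length_eq_zero_iff.mp (by exact_mod_cast h)
    · right; exact h

-- ===== VERDICT (by name: the statement is the Claim_ definition above) =====
theorem find_subsequence_py_spec : Claim_equal_find_subsequence_py := by
  intro haystack needle _
  unfold Spec_find_subsequence_py find_subsequence_py find_subsequence_py_alt
  by_cases hg : needle = [] ∨ (needle.length : Int) > (haystack.length : Int)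
  · rw [if_pos hg, if_pos ((guard_iff haystack needle).mp hg)]
  · rw [if_neg hg, if_neg (fun h => hg ((guard_iff haystack needle).mpr h))]
    set L : Int := (needle.length : Int) with hL
    set n : Int := (haystack.length : Int) with hn
    set p : Int → Bool := fun i => (PySem.List.slice haystack (some i) (some (i + L))) == needle with hpdef
    have hrange : PySem.List.pyRange (n - L) (-1) (-1) =
        (PySem.List.pyRange 0 (n - L + 1) 1).reverse := by
      rw [PySem.List.pyRange_neg_one_eq_reverse]; norm_num
    rw [findLoopA_eq, hrange, List.filter_reverse, List.head?_reverse]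
    rw [PySem.List.maxD, max?_chain _ ((PySem.List.pairwise_lt_pyRange_one 0 (n - L + 1)).filter p)]
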